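-- pv_equiv track=rewrite | github.com/Eyepea/xivo-skaro | provisioning2/src/prov2/util.py | from_mac
-- ===== SOURCE A (Python) =====
-- def from_mac(packed_mac, separator=':', uppercase=False):
--     """Takes a 6-bytes string representation of a MAC address and return the
--     human readable representation.
--
--     """
--     if len(packed_mac) != 6:
--         raise ValueError('invalid packed MAC')
--     if uppercase:
--         fmt = '%02X'
--     else:
--         fmt = '%02x'
--     return separator.join(fmt % ord(e) for e in packed_mac)
-- ===== SOURCE B (Python) =====
-- def from_mac(packed_mac, separator=':', uppercase=False):
--     if len(packed_mac) != 6: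
--         raise ValueError('invalid packed MAC')
--     h = packed_mac.encode('ascii').hex()
--     if uppercase:
--         h = h.upper()
--     return separator.join(h[i:i + 2] for i in range(0, 12, 2))
-- ===== Notes on version B (the rewrite author's own statement) =====
-- stated objective: idiomatic
-- what changed: Replaces the per-byte ord/format generator with one bulk hex conversion of the whole 6-byte string (encode + bytes.hex), an optional single upper() on the 12-char hex string, and a chunking join over 2-char slices.
import Mathlib
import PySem

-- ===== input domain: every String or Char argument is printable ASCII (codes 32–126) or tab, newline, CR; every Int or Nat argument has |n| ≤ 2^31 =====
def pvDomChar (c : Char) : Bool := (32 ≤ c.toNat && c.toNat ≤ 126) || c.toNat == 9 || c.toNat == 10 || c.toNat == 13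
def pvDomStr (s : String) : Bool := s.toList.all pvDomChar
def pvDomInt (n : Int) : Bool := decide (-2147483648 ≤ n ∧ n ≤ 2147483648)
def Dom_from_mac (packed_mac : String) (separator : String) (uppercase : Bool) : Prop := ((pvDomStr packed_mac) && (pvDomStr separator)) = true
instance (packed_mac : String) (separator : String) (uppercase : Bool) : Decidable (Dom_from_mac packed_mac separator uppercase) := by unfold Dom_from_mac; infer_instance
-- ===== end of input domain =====

-- B replaces A's per-byte '%02x' % ord(e) generator by one bulk hex conversion of the
-- whole string followed by an optional .upper() and a 2-char chunking join (idiomatic).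


-- ===== PORT A =====
-- '%02x' % n / '%02X' % n for 0 ≤ n < 256 (exact on that range; Dom gives codes ≤ 126)
def pvFmt02 (digits : List Char) (n : Nat) : List Char :=
  [digits.getD (n / 16) '0', digits.getD (n % 16) '0']

def pvHexLower : List Char :=
  ['0','1','2','3','4','5','6','7','8','9','a','b','c','d','e','f']

def pvHexUpper : List Char :=
  ['0','1','2','3','4','5','6','7','8','9','A','B','C','D','E','F']

def from_mac (packed_mac : String) (separator : String) (uppercase : Bool) : String :=
  if packed_mac.toList.length ≠ 6 then ""   -- raise ValueError('invalid packed MAC'): excluded by Pre_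
  else
    let digits := if uppercase then pvHexUpper else pvHexLower
    String.ofList (PySem.Chars.join separator.toList
      (packed_mac.toList.map (fun e => pvFmt02 digits e.toNat)))

-- ===== PORT B =====
-- packed_mac.encode('ascii').hex(): bulk lowercase hex of the whole byte string
-- (exact for ASCII input, which Dom guarantees)
def pvHexlify (cs : List Char) : List Char :=
  cs.flatMap (fun c =>
    [pvHexLower.getD (c.toNat / 16) '0', pvHexLower.getD (c.toNat % 16) '0'])

def from_mac_alt (packed_mac : String) (separator : String) (uppercase : Bool) : String :=
  if packed_mac.toList.length ≠ 6 then ""   -- raise ValueError('invalid packed MAC'): excluded by Pre_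
  else
    let h := pvHexlify packed_mac.toList
    let h2 := if uppercase then PySem.Chars.upper h else h
    String.ofList (PySem.Chars.join separator.toList
      ((PySem.List.pyRange 0 12 2).map
        (fun i => PySem.List.slice h2 (some i) (some (i + 2)))))

-- ===== PRECONDITION & SPEC =====
-- A raises ValueError unless the packed MAC has exactly 6 characters.
def Pre_from_mac (packed_mac : String) (separator : String) (uppercase : Bool) : Prop :=
  packed_mac.toList.length = 6
instance (packed_mac : String) (separator : String) (uppercase : Bool) : Decidable (Pre_from_mac packed_mac separator uppercase) := by unfold Pre_from_mac; infer_instance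

def pvWitness_from_mac : String × String × Bool := ("abcdef", ":", false)

def Spec_from_mac (packed_mac : String) (separator : String) (uppercase : Bool) (out : String) : Prop := out = from_mac_alt packed_mac separator uppercase
instance (packed_mac : String) (separator : String) (uppercase : Bool) (out : String) : Decidable (Spec_from_mac packed_mac separator uppercase out) := by unfold Spec_from_mac; infer_instance

-- ===== CLAIM (what is proved, stated in full; the proofs are below) =====
def Claim_equal_from_mac : Prop := ∀ (packed_mac : String) (separator : String) (uppercase : Bool), Dom_from_mac packed_mac separator uppercase → Pre_from_mac packed_mac separator uppercase → Spec_from_mac packed_mac separator uppercase (from_mac packed_mac separator uppercase)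

-- ===== LEMMAS AND PROOFS =====
-- upper-casing a lowercase hex digit gives the uppercase hex digit
theorem pv_upper_digit : ∀ k < 16,
    PySem.Chars.upperChar (pvHexLower.getD k '0') = pvHexUpper.getD k '0' := by decide

-- for a byte ≤ 126 the two hexlify chars, uppercased, are '%02X' % n
theorem pv_upper_byte (n : Nat) (h : n ≤ 126) :
    PySem.Chars.upperChar (pvHexLower.getD (n / 16) '0') = pvHexUpper.getD (n / 16) '0' ∧
    PySem.Chars.upperChar (pvHexLower.getD (n % 16) '0') = pvHexUpper.getD (n % 16) '0' :=
  ⟨pv_upper_digit _ (by omega), pv_upper_digit _ (Nat.mod_lt _ (by omega))⟩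

theorem from_mac_spec : Claim_equal_from_mac := by
  intro pm sep u hdom hpre
  unfold Spec_from_mac from_mac from_mac_alt Pre_from_mac at *
  have hdc : ∀ c ∈ pm.toList, c.toNat ≤ 126 := by
    intro c hc
    have : pvDomStr pm = true := by
      simp [Dom_from_mac, Bool.and_eq_true] at hdom; exact hdom.1
    have := (List.all_eq_true.mp this) c hc
    simp only [pvDomChar, Bool.or_eq_true, Bool.and_eq_true, beq_iff_eq,
      decide_eq_true_eq] at this
    omega
  match hlist : pm.toList, hpre with
  | [a, b, c, d, e, f], _ =>
    have ha := pv_upper_byte a.toNat (hdc a (by simp [hlist]))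
    have hb := pv_upper_byte b.toNat (hdc b (by simp [hlist]))
    have hc := pv_upper_byte c.toNat (hdc c (by simp [hlist]))
    have hd := pv_upper_byte d.toNat (hdc d (by simp [hlist]))
    have he := pv_upper_byte e.toNat (hdc e (by simp [hlist]))
    have hf := pv_upper_byte f.toNat (hdc f (by simp [hlist]))
    simp only [List.getD_eq_getElem?_getD] at ha hb hc hd he hf
    rw [show PySem.List.pyRange 0 12 2 = [0, 2, 4, 6, 8, 10] from by decide]
    cases u <;>
      simp [pvHexlify, pvFmt02, PySem.Chars.upper, PySem.List.slice,
        PySem.List.clampIdx, ha.1, ha.2, hb.1, hb.2, hc.1, hc.2, hd.1, hd.2,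
        he.1, he.2, hf.1, hf.2]
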